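-- pv_equiv track=rewrite | github.com/vanessabarbosaaa-rgb/Algoritimo | PARTE2.4.py | busca_insercao
-- ===== SOURCE A (Python) =====
-- def busca_insercao(lista, alvo):
--
--     esquerda, direita = 0, len(lista)
--     while esquerda < direita:
--         meio = (esquerda + direita) // 2
--         if lista[meio] < alvo:
--             esquerda = meio + 1
--         else:
--             direita = meio
--     return esquerda
-- ===== SOURCE B (Python) =====
-- def busca_insercao(lista, alvo):
--     for i, x in enumerate(lista):
--         if x >= alvo:
--             return i
--     return len(lista)
-- ===== Notes on version B (the rewrite author's own statement) =====
-- stated objective: simpler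
-- what changed: Replaces the [left,right) binary-search window with a single forward scan (enumerate) returning the index of the first element that is >= alvo, or len(lista) if none.
-- outside the precondition, e.g. on busca_insercao([2, 1], 2): A returns 2, B returns 0
import Mathlib
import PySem

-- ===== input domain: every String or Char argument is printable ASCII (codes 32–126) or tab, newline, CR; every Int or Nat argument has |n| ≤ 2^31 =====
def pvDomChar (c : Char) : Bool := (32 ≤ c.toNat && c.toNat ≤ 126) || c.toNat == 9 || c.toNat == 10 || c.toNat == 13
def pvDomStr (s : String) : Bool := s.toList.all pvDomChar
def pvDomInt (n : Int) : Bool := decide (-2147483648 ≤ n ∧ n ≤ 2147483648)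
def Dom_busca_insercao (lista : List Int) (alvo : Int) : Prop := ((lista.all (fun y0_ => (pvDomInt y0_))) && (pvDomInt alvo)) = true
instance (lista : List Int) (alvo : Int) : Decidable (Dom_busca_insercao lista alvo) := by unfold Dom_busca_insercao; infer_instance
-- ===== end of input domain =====

-- B replaces A's binary search by a single forward scan returning the index of the
-- first element ≥ alvo (simpler, not faster); equal to A on sorted lists (Pre_).

-- ===== PORT A =====
-- A's while loop on the window [esquerda, direita); the 'none' branch of the index
-- access is unreachable from busca_insercao's call (0 ≤ esquerda ≤ meio < direita ≤ len).
def buscaLoopA (lista : List Int) (alvo : Int) (esquerda direita : Int) : Int :=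
  if h : esquerda < direita then
    let meio := PySem.Int.floordiv (esquerda + direita) 2
    match PySem.List.pyGet? lista meio with
    | some v =>
        if v < alvo then buscaLoopA lista alvo (meio + 1) direita
        else buscaLoopA lista alvo esquerda meio
    | none => esquerda
  else esquerda
termination_by (direita - esquerda).toNat
decreasing_by
  · have h1 := PySem.Int.floordiv_two_mid_bounds (le_of_lt h)
    omega
  · have h2 : PySem.Int.floordiv (esquerda + direita) 2 < direita := by
      rw [PySem.Int.floordiv_lt_iff_lt_mul (by omega : (0:Int) < 2)]
      omega
    omega

def busca_insercao (lista : List Int) (alvo : Int) : Int :=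
  buscaLoopA lista alvo 0 (lista.length : Int)

-- ===== PORT B =====
-- Source B's enumerate loop: a forward scan with a running index.
def buscaScanB (lista : List Int) (alvo : Int) (i : Int) : Int :=
  match lista with
  | [] => i
  | x :: xs => if x ≥ alvo then i else buscaScanB xs alvo (i + 1)

def busca_insercao_alt (lista : List Int) (alvo : Int) : Int :=
  buscaScanB lista alvo 0

-- ===== PRECONDITION & SPEC =====
-- Pre_ excludes lists that are not partitioned around alvo (some element ≥ alvo occurs
-- before some element < alvo), on which A still returns: binary search's contract requires
-- a sorted input, and on such lists A's returned index is an accident of its probe path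
-- that no caller would specify (A's and B's values are equally defensible there).
def Pre_busca_insercao (lista : List Int) (alvo : Int) : Prop :=
  lista.Pairwise (fun a b => b < alvo → a < alvo)
instance (lista : List Int) (alvo : Int) : Decidable (Pre_busca_insercao lista alvo) := by
  unfold Pre_busca_insercao; infer_instance

def pvWitness_busca_insercao : List Int × Int := ([1, 3, 3, 5], 4)

def Spec_busca_insercao (lista : List Int) (alvo : Int) (out : Int) : Prop := out = busca_insercao_alt lista alvo
instance (lista : List Int) (alvo : Int) (out : Int) : Decidable (Spec_busca_insercao lista alvo out) := by unfold Spec_busca_insercao; infer_instance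

-- ===== CLAIM (what is proved, stated in full; the proofs are below) =====
def Claim_equal_busca_insercao : Prop := ∀ (lista : List Int) (alvo : Int), Dom_busca_insercao lista alvo → Pre_busca_insercao lista alvo → Spec_busca_insercao lista alvo (busca_insercao lista alvo)

-- ===== LEMMAS AND PROOFS =====

-- B's scan returns i plus the length of the longest prefix of elements < alvo.
theorem buscaScanB_eq (lista : List Int) (alvo : Int) :
    ∀ i : Int, buscaScanB lista alvo i =
      i + ((lista.takeWhile (fun x => decide (x < alvo))).length : Int) := by
  induction lista with
  | nil => intro i; simp [buscaScanB]
  | cons x xs ih =>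
    intro i
    by_cases hx : x < alvo
    · have hge : ¬ (x ≥ alvo) := by omega
      simp only [buscaScanB, if_neg hge, List.takeWhile_cons, hx, decide_true, if_true,
        ih, List.length_cons]
      push_cast
      omega
    · have hge : x ≥ alvo := by omega
      simp [buscaScanB, hge, hx]

-- On a sorted list, an element is < alvo exactly when its index lies in that prefix.
theorem key_iff (lista : List Int) (alvo : Int)
    (hs : lista.Pairwise (fun a b => b < alvo → a < alvo))
    (i : Nat) (hi : i < lista.length) :
    (lista[i] < alvo ↔ i < (lista.takeWhile (fun x => decide (x < alvo))).length) := by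
  set p : Int → Bool := fun x => decide (x < alvo) with hp
  have hpref := List.takeWhile_prefix (p := p) (l := lista)
  have htle : (lista.takeWhile p).length ≤ lista.length := hpref.length_le
  constructor
  · intro hlt
    by_contra hge
    have hti : (lista.takeWhile p).length ≤ i := by omega
    have htlen : (lista.takeWhile p).length < lista.length := lt_of_le_of_lt hti hi
    -- the element at index t = |takeWhile p| is the head of dropWhile p, which fails p
    have hdwlen : (lista.takeWhile p).length + (lista.dropWhile p).length = lista.length := by
      rw [← List.length_append, List.takeWhile_append_dropWhile]
    have hdwne : lista.dropWhile p ≠ [] := by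
      intro hnil
      rw [hnil] at hdwlen
      simp at hdwlen
      omega
    have hhead := List.head_dropWhile_not p hdwne
    have hsplit : lista = lista.takeWhile p ++ lista.dropWhile p :=
      (List.takeWhile_append_dropWhile (p := p) (l := lista)).symm
    have hgett : lista[(lista.takeWhile p).length]'htlen = (lista.dropWhile p).head hdwne := by
      rw [List.getElem_of_eq hsplit htlen, List.getElem_append_right (le_refl _)]
      simp [List.getElem_zero]
    have htval : ¬ (lista[(lista.takeWhile p).length]'htlen < alvo) := by
      rw [hgett]
      simpa [hp] using hhead
    -- sortedness: lista[t] ≤ lista[i]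
    rcases eq_or_lt_of_le hti with heq | hlt'
    · exact htval (by simpa [heq] using hlt)
    · have hrel := hs.rel_get_of_lt
        (a := ⟨(lista.takeWhile p).length, htlen⟩) (b := ⟨i, hi⟩) hlt'
      simp only [List.get_eq_getElem] at hrel
      exact htval (hrel hlt)
  · intro hlt
    have hget : lista[i] = (lista.takeWhile p)[i]'hlt := (hpref.getElem hlt).symm
    have hmem : (lista.takeWhile p)[i]'hlt ∈ lista.takeWhile p := List.getElem_mem _
    have := List.mem_takeWhile_imp hmem
    simp only [hp, decide_eq_true_eq] at this
    rw [hget]; exact this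

-- A's window loop returns t = |takeWhile (· < alvo)| whenever the window brackets t.
theorem buscaLoopA_eq (lista : List Int) (alvo : Int)
    (hs : lista.Pairwise (fun a b => b < alvo → a < alvo)) :
    ∀ (n : Nat) (esquerda direita : Int), (direita - esquerda).toNat = n →
      0 ≤ esquerda →
      esquerda ≤ ((lista.takeWhile (fun x => decide (x < alvo))).length : Int) →
      ((lista.takeWhile (fun x => decide (x < alvo))).length : Int) ≤ direita →
      direita ≤ (lista.length : Int) →
      buscaLoopA lista alvo esquerda direita =
        ((lista.takeWhile (fun x => decide (x < alvo))).length : Int) := by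
  intro n
  induction n using Nat.strong_induction_on with
  | _ n ih =>
    intro e d hn h0 het htd hdl
    have htle : (lista.takeWhile (fun x => decide (x < alvo))).length ≤ lista.length :=
      (List.takeWhile_prefix _).length_le
    rw [buscaLoopA]
    split
    · next h =>
      have hmid := PySem.Int.floordiv_two_mid_bounds (le_of_lt h)
      have hmlt : PySem.Int.floordiv (e + d) 2 < d := by
        rw [PySem.Int.floordiv_lt_iff_lt_mul (by omega : (0:Int) < 2)]
        omega
      set meio := PySem.Int.floordiv (e + d) 2 with hmeio
      have h0m : 0 ≤ meio := by omega
      have hmlen : meio < (lista.length : Int) := by omega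
      simp only [PySem.List.pyGet?_eq_some_getElem lista h0m hmlen]
      have hmn : (meio.toNat : Int) = meio := Int.toNat_of_nonneg h0m
      have hmnat : meio.toNat < lista.length := by omega
      have hkey := key_iff lista alvo hs meio.toNat hmnat
      split
      · next hv =>
        have htm : meio.toNat < (lista.takeWhile (fun x => decide (x < alvo))).length :=
          hkey.mp hv
        exact ih (d - (meio + 1)).toNat (by omega) (meio + 1) d rfl (by omega)
          (by omega) htd hdl
      · next hv =>
        have htm : (lista.takeWhile (fun x => decide (x < alvo))).length ≤ meio.toNat := by
          by_contra hc
          exact hv (hkey.mpr (by omega))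
        exact ih (meio - e).toNat (by omega) e meio rfl h0 het (by omega) (by omega)
    · next h => omega

-- ===== VERDICT (by name: the statement is the Claim_ definition above) =====
theorem busca_insercao_spec : Claim_equal_busca_insercao := by
  intro lista alvo _hdom hpre
  unfold Spec_busca_insercao busca_insercao busca_insercao_alt
  have htle : (lista.takeWhile (fun x => decide (x < alvo))).length ≤ lista.length :=
    (List.takeWhile_prefix _).length_le
  rw [buscaLoopA_eq lista alvo hpre ((lista.length : Int) - 0).toNat 0 (lista.length : Int)
    rfl (by omega) (by exact_mod_cast Int.ofNat_le.mpr (Nat.zero_le _)) (by exact_mod_cast htle)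
    (le_refl _), buscaScanB_eq]
  omega
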